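-- pv_equiv track=rewrite | github.com/MillionConcepts/dustgoggles | dustgoggles/structures.py | insert_after
-- ===== SOURCE A (Python) =====
-- from typing import (
--     Mapping,
--     Collection,
--     Any,
--     Union,
--     Sequence,
--     MutableMapping,
--     Callable,
--     Type,
--     Hashable,
-- )
--
-- def insert_after(
--     new_key: Any, new_value: Any, prior_key: Any, mapping: Mapping
-- ) -> Mapping:
--     new_dict = {}
--     for key, value in mapping.items():
--         new_dict[key] = value
--         if key == prior_key:
--             new_dict[new_key] = new_value
--     return new_dict
-- ===== SOURCE B (Python) =====
-- def insert_after(new_key, new_value, prior_key, mapping):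
--     # Locate the insertion position first, then assemble by slicing; dict()
--     # restores the dict's duplicate-key semantics if new_key already exists.
--     items = list(mapping.items())
--     keys = [k for k, _ in items]
--     if prior_key in keys:
--         i = keys.index(prior_key)
--         items = items[:i + 1] + [(new_key, new_value)] + items[i + 1:]
--     return dict(items)
-- ===== Notes on version B (the rewrite author's own statement) =====
-- stated objective: alternative
-- what changed: Instead of copying pairs one by one and conditionally inserting inside the loop, B finds the index of prior_key once, splices [(new_key, new_value)] into the item list by slicing, and lets dict() of the spliced list restore dict semantics.
import Mathlib
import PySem

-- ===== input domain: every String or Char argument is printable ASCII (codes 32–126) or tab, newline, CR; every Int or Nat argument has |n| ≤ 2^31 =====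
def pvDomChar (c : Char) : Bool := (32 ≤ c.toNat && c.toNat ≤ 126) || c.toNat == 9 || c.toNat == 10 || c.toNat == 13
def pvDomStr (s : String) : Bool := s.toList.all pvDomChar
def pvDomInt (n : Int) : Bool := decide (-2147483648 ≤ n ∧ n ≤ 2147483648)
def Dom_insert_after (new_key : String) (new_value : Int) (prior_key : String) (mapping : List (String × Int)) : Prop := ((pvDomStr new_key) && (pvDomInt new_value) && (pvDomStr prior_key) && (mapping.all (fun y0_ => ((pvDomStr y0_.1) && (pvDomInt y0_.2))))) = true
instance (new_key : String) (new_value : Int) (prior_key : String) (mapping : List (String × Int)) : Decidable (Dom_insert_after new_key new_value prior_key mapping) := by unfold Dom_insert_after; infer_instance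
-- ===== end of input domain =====

-- B locates prior_key's index once and splices the new pair in by slicing, letting
-- dict() of the spliced item list restore dict semantics (alternative decomposition).


-- ===== PORT A =====
-- for key, value in mapping.items(): new_dict[key] = value; if key == prior_key: new_dict[new_key] = new_value
def insert_after (new_key : String) (new_value : Int) (prior_key : String) (mapping : List (String × Int)) : List (String × Int) :=
  (mapping.foldl (fun new_dict p =>
      let d' := new_dict.insert p.1 p.2
      if p.1 == prior_key then d'.insert new_key new_value else d')
    PySem.Dict.empty).items

-- ===== PORT B =====
-- items = list(mapping.items()); keys = [k for k,_ in items];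
-- 'if prior_key in keys: i = keys.index(prior_key)' is the match on index? (some i ↔ membership);
-- items[:i+1] + [(new_key, new_value)] + items[i+1:]; return dict(items)
def insert_after_alt (new_key : String) (new_value : Int) (prior_key : String) (mapping : List (String × Int)) : List (String × Int) :=
  let items := mapping
  let keys := items.map (·.1)
  let items' :=
    match PySem.List.index? keys prior_key with
    | some i => PySem.List.slice items none (some ((i : Int) + 1))
                  ++ (new_key, new_value) :: PySem.List.slice items (some ((i : Int) + 1)) none
    | none => items
  (PySem.Dict.ofList items').items

-- ===== PRECONDITION & SPEC =====
-- The mapping argument is a Python dict; association lists with duplicate keys represent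
-- no dict input at all (no Python call can produce them), so they are excluded.
def Pre_insert_after (new_key : String) (new_value : Int) (prior_key : String) (mapping : List (String × Int)) : Prop :=
  (mapping.map Prod.fst).Nodup
instance (new_key : String) (new_value : Int) (prior_key : String) (mapping : List (String × Int)) : Decidable (Pre_insert_after new_key new_value prior_key mapping) := by unfold Pre_insert_after; infer_instance

def pvWitness_insert_after : String × Int × String × (List (String × Int)) := ("b", 7, "a", [("a", 1), ("c", 2)])

def Spec_insert_after (new_key : String) (new_value : Int) (prior_key : String) (mapping : List (String × Int)) (out : List (String × Int)) : Prop := out = insert_after_alt new_key new_value prior_key mapping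
instance (new_key : String) (new_value : Int) (prior_key : String) (mapping : List (String × Int)) (out : List (String × Int)) : Decidable (Spec_insert_after new_key new_value prior_key mapping out) := by unfold Spec_insert_after; infer_instance

-- ===== CLAIM (what is proved, stated in full; the proofs are below) =====
def Claim_equal_insert_after : Prop := ∀ (new_key : String) (new_value : Int) (prior_key : String) (mapping : List (String × Int)), Dom_insert_after new_key new_value prior_key mapping → Pre_insert_after new_key new_value prior_key mapping → Spec_insert_after new_key new_value prior_key mapping (insert_after new_key new_value prior_key mapping)

-- ===== LEMMAS AND PROOFS =====

-- a successful index? on the key list splits the pair list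
theorem pv_split_of_index? (mapping : List (String × Int)) (k : String) (i : Nat)
    (h : PySem.List.index? (mapping.map (·.1)) k = some i) :
    ∃ xs v ys, mapping = xs ++ (k, v) :: ys ∧ xs.length = i ∧ k ∉ xs.map (·.1) := by
  obtain ⟨pre, suf, hmap, hlen, hnot⟩ := (PySem.List.index?_eq_some_iff _ _ _).1 h
  obtain ⟨xs, rest, rfl, hxs, hrest⟩ := List.map_eq_append_iff.1 hmap
  cases rest with
  | nil => simp at hrest
  | cons p ys =>
    simp only [List.map_cons, List.cons.injEq] at hrest
    exact ⟨xs, p.2, ys, by simp [← hrest.1], by rw [← hxs] at hlen; simpa using hlen, by rw [hxs]; exact hnot⟩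

-- on a segment whose keys avoid prior_key, A's loop body is a plain dict insert
theorem pv_fold_no_prior (new_key : String) (new_value : Int) (prior_key : String)
    (l : List (String × Int)) (d : PySem.Dict String Int)
    (h : prior_key ∉ l.map (·.1)) :
    l.foldl (fun new_dict p =>
        let d' := new_dict.insert p.1 p.2
        if p.1 == prior_key then d'.insert new_key new_value else d') d
      = l.foldl (fun acc p => acc.insert p.1 p.2) d := by
  apply PySem.List.foldl_congr_mem
  intro acc p hp
  have : p.1 ≠ prior_key := fun e => h (e ▸ List.mem_map_of_mem hp)
  simp [this]

-- ===== VERDICT (by name: the statement is the Claim_ definition above) =====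
theorem insert_after_spec : Claim_equal_insert_after := by
  intro new_key new_value prior_key mapping _ hpre
  unfold Spec_insert_after insert_after insert_after_alt
  dsimp only
  cases h : PySem.List.index? (mapping.map (·.1)) prior_key with
  | none =>
    have hnm : prior_key ∉ mapping.map (·.1) := (PySem.List.index?_eq_none_iff _ _).1 h
    dsimp only
    rw [pv_fold_no_prior _ _ _ _ _ hnm]
    rfl
  | some i =>
    obtain ⟨xs, v, ys, rfl, hlen, hxs⟩ := pv_split_of_index? mapping prior_key i h
    have hys : prior_key ∉ ys.map (·.1) := by
      unfold Pre_insert_after at hpre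
      simp only [List.map_append, List.map_cons, List.nodup_append, List.nodup_cons] at hpre
      exact hpre.2.1.1
    dsimp only
    have hcast : (i : Int) + 1 = ((xs.length + 1 : Nat) : Int) := by omega
    rw [hcast, PySem.List.slice_to_natCast, PySem.List.slice_from_natCast]
    have hsplit : xs ++ (prior_key, v) :: ys = (xs ++ [(prior_key, v)]) ++ ys := by simp
    have hlen1 : (xs ++ [(prior_key, v)]).length = xs.length + 1 := by simp
    rw [hsplit, List.take_left' hlen1, List.drop_left' hlen1]
    have hofl : PySem.Dict.ofList ((xs ++ [(prior_key, v)]) ++ (new_key, new_value) :: ys)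
        = ys.foldl (fun acc p => acc.insert p.1 p.2)
            (((xs.foldl (fun acc p => acc.insert p.1 p.2) PySem.Dict.empty).insert prior_key v).insert new_key new_value) := by
      show ((xs ++ [(prior_key, v)]) ++ (new_key, new_value) :: ys).foldl (fun acc p => acc.insert p.1 p.2) PySem.Dict.empty = _
      simp [List.foldl_append]
    rw [hofl, List.foldl_append, List.foldl_append]
    rw [pv_fold_no_prior _ _ _ _ _ hxs, pv_fold_no_prior new_key new_value prior_key ys _ hys]
    simp
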